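-- pv_equiv track=rewrite | github.com/Louw115/neurop-forge | neurop_forge/core/normalization.py | _normalize_string_literals
-- ===== SOURCE A (Python) =====
-- def _normalize_string_literals(source: str) -> str:
--     """Normalize string quote style."""
--     result = []
--     i = 0
--     while i < len(source):
--         if source[i] == "'":
--             end = source.find("'", i + 1)
--             if end != -1:
--                 content = source[i+1:end]
--                 result.append(f'"{content}"')
--                 i = end + 1
--                 continue
--         result.append(source[i])
--         i += 1
--     return ''.join(result)
-- ===== SOURCE B (Python) =====
-- def _normalize_string_literals(source: str) -> str:
--     """Normalize string quote style (split-based: pair up the quote-separated parts)."""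
--     parts = source.split("'")
--     res = parts[0]
--     j = 1
--     while j + 1 < len(parts):
--         res += '"' + parts[j] + '"' + parts[j + 1]
--         j += 2
--     if j < len(parts):
--         res += "'" + parts[j]
--     return res
-- ===== Notes on version B (the rewrite author's own statement) =====
-- stated objective: faster
-- what changed: Replaces the index-based while-loop scanner with its repeated find calls and slicing by a single split on the single-quote character followed by pairing up consecutive parts (odd-position parts get double-quoted, a lone trailing part keeps its opening quote).
import Mathlib
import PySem

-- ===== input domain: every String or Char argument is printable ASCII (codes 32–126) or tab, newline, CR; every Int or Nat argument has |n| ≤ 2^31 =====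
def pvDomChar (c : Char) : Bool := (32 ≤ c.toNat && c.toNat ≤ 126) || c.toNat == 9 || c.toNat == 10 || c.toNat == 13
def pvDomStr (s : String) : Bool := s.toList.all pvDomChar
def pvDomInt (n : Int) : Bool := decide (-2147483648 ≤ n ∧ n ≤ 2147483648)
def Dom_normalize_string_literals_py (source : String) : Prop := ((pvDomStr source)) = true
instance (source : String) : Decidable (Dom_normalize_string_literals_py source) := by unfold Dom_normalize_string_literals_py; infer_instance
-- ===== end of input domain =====

-- B replaces A's index-based scanner (with repeated `find` calls) by one split on the
-- single-quote character followed by pairing up the parts; measured faster by a constant factor.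

-- ===== PORT A =====
-- A's while loop, step for step; `fuel` only makes the loop total (i strictly increases,
-- so fuel = s.length is always enough). acc is the joined `result` list.
def nslLoopA (s : List Char) : Nat → Nat → List Char → List Char
  | 0, _, acc => acc
  | fuel + 1, i, acc =>
    if h : i < s.length then
      let c := s[i]
      if c = '\'' then
        let e := PySem.Chars.findFrom s ['\''] ((i : Int) + 1)
        if e ≠ -1 then
          let content := PySem.List.slice s (some ((i : Int) + 1)) (some e)
          nslLoopA s fuel (e.toNat + 1) (acc ++ '"' :: content ++ ['"'])
        else
          nslLoopA s fuel (i + 1) (acc ++ [c])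
      else
        nslLoopA s fuel (i + 1) (acc ++ [c])
    else acc

def normalize_string_literals_py (source : String) : String :=
  String.ofList (nslLoopA source.toList source.toList.length 0 [])

-- ===== PORT B =====
-- the pairing loop of Source B: parts[j], parts[j+1] per step, lone trailing part keeps its "'"
def nslPairsB : List (List Char) → List Char
  | [] => []
  | [p] => '\'' :: p
  | p :: q :: rest => '"' :: p ++ '"' :: q ++ nslPairsB rest

def normalize_string_literals_py_alt (source : String) : String :=
  match PySem.Chars.splitOn source.toList ['\''] with
  | [] => ""  -- unreachable: split never returns an empty list
  | p :: rest => String.ofList (p ++ nslPairsB rest)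

-- ===== PRECONDITION & SPEC =====
def Spec_normalize_string_literals_py (source : String) (out : String) : Prop := out = normalize_string_literals_py_alt source
instance (source : String) (out : String) : Decidable (Spec_normalize_string_literals_py source out) := by unfold Spec_normalize_string_literals_py; infer_instance

-- ===== CLAIM (what is proved, stated in full; the proofs are below) =====
def Claim_equal_normalize_string_literals_py : Prop := ∀ (source : String), Dom_normalize_string_literals_py source → Spec_normalize_string_literals_py source (normalize_string_literals_py source)

-- ===== LEMMAS AND PROOFS =====

-- proof-side model of `split` on "'": structural recursion over the characters
def nslSplitQ : List Char → List (List Char)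
  | [] => [[]]
  | c :: rest =>
    if c = '\'' then [] :: nslSplitQ rest
    else
      match nslSplitQ rest with
      | [] => [[c]]
      | p :: r => (c :: p) :: r

def nslJoin (parts : List (List Char)) : List Char :=
  match parts with
  | [] => []
  | p :: rest => p ++ nslPairsB rest

theorem nslSplitQ_ne_nil (s : List Char) : nslSplitQ s ≠ [] := by
  cases s with
  | nil => simp [nslSplitQ]
  | cons c rest =>
    simp only [nslSplitQ]
    split
    · simp
    · split <;> simp_all

theorem nslSplitQ_of_not_mem (s : List Char) (h : '\'' ∉ s) : nslSplitQ s = [s] := by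
  induction s with
  | nil => rfl
  | cons c rest ih =>
    simp only [List.mem_cons, not_or] at h
    have hc : ¬ c = '\'' := fun hh => h.1 hh.symm
    simp only [nslSplitQ, if_neg hc, ih h.2]

theorem nslSplitQ_append (p t : List Char) (h : '\'' ∉ p) :
    nslSplitQ (p ++ '\'' :: t) = p :: nslSplitQ t := by
  induction p with
  | nil => simp [nslSplitQ]
  | cons c q ih =>
    simp only [List.mem_cons, not_or] at h
    have hc : ¬ c = '\'' := fun hh => h.1 hh.symm
    simp only [List.cons_append, nslSplitQ, if_neg hc, ih h.2]

theorem nslGo_eq : ∀ (fuel : Nat) (l cur : List Char) (acc : List (List Char)), l.length ≤ fuel →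
    PySem.Chars.splitOn.go ['\''] fuel l cur acc =
      acc.reverse ++ (match nslSplitQ l with
        | [] => []
        | p :: r => (cur.reverse ++ p) :: r) := by
  intro fuel
  induction fuel with
  | zero =>
    intro l cur acc hl
    have : l = [] := List.length_eq_zero_iff.mp (Nat.le_zero.mp hl)
    subst this
    simp [PySem.Chars.splitOn.go, nslSplitQ]
  | succ fuel ih =>
    intro l cur acc hl
    cases l with
    | nil => simp [PySem.Chars.splitOn.go, nslSplitQ]
    | cons c rest =>
      simp only [List.length_cons, Nat.add_le_add_iff_right] at hl
      by_cases hc : c = '\''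
      · subst hc
        have hpre : List.isPrefixOf ['\''] ('\'' :: rest) = true := by
          simp [List.isPrefixOf]
        rw [PySem.Chars.splitOn.go, if_pos hpre]
        simp only [List.length_singleton, List.drop_succ_cons, List.drop_zero]
        rw [ih rest [] (cur.reverse :: acc) hl]
        obtain ⟨p, r, hpr⟩ : ∃ p r, nslSplitQ rest = p :: r := by
          cases hsq : nslSplitQ rest with
          | nil => exact absurd hsq (nslSplitQ_ne_nil rest)
          | cons p r => exact ⟨p, r, rfl⟩
        simp [nslSplitQ, hpr]
      · have hpre : List.isPrefixOf ['\''] (c :: rest) = false := by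
          simp [List.isPrefixOf]
          intro h; exact absurd h.symm hc
        rw [PySem.Chars.splitOn.go, if_neg (by simp [hpre])]
        rw [ih rest (c :: cur) acc hl]
        obtain ⟨p, r, hpr⟩ : ∃ p r, nslSplitQ rest = p :: r := by
          cases hsq : nslSplitQ rest with
          | nil => exact absurd hsq (nslSplitQ_ne_nil rest)
          | cons p r => exact ⟨p, r, rfl⟩
        simp only [nslSplitQ, if_neg hc, hpr]
        simp

theorem nslSplitOn_eq (s : List Char) : PySem.Chars.splitOn s ['\''] = nslSplitQ s := by
  rw [PySem.Chars.splitOn, nslGo_eq (s.length + 1) s [] [] (Nat.le_succ _)]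
  obtain ⟨p, r, hpr⟩ : ∃ p r, nslSplitQ s = p :: r := by
    cases hsq : nslSplitQ s with
    | nil => exact absurd hsq (nslSplitQ_ne_nil s)
    | cons p r => exact ⟨p, r, rfl⟩
  simp [hpr]

theorem nslMem_singleton_infix (a : Char) (l : List Char) : [a] <:+: l ↔ a ∈ l := by
  constructor
  · intro ⟨u, v, huv⟩
    subst huv; simp
  · intro hm
    obtain ⟨u, v, huv⟩ := List.append_of_mem hm
    exact ⟨u, v, by simp [huv]⟩

-- main loop invariant: scanning from i produces the split-join of the remaining suffix
theorem nslLoopA_eq (s : List Char) : ∀ (fuel i : Nat) (acc : List Char), s.length ≤ fuel + i →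
    nslLoopA s fuel i acc = acc ++ nslJoin (nslSplitQ (s.drop i)) := by
  intro fuel
  induction fuel with
  | zero =>
    intro i acc hfi
    have hd : s.drop i = [] := List.drop_eq_nil_of_le (by omega)
    simp [nslLoopA, hd, nslSplitQ, nslJoin, nslPairsB]
  | succ fuel ih =>
    intro i acc hfi
    rw [nslLoopA]
    by_cases h : i < s.length
    · rw [dif_pos h]
      have hdropi : s.drop i = s[i] :: s.drop (i + 1) := List.drop_eq_getElem_cons h
      have hrest : s.drop (i + 1) = (s.drop i).tail := by rw [hdropi]; rfl
      by_cases hc : s[i] = '\''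
      · simp only [if_pos hc]
        have hk1 : ((i : Int) + 1) = ((i + 1 : Nat) : Int) := by push_cast; ring
        have hff := PySem.Chars.findFrom_natCast s ['\''] (i + 1) (by omega)
        set f := PySem.Chars.find (s.drop (i + 1)) ['\''] with hf
        by_cases hfneg : f = -1
        · -- no closing quote: rest has no quote, quote is copied literally
          have he : PySem.Chars.findFrom s ['\''] ((i : Int) + 1) = -1 := by
            rw [hk1, hff, if_pos hfneg]
          rw [if_neg (by simp [he])]
          have hnm : '\'' ∉ s.drop (i + 1) := by
            have := (PySem.Chars.find_eq_neg_one_iff (s := s.drop (i + 1)) (sub := ['\''])).mp hfneg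
            rw [nslMem_singleton_infix] at this; exact this
          rw [ih (i + 1) (acc ++ [s[i]]) (by omega)]
          rw [nslSplitQ_of_not_mem _ hnm, hdropi, hc]
          simp [nslSplitQ, nslSplitQ_of_not_mem _ hnm, nslJoin, nslPairsB]
        · -- closing quote at relative index k: emit "content" and jump past it
          have hf0 : 0 ≤ f := by
            have := PySem.Chars.neg_one_le_find (s := s.drop (i + 1)) (sub := ['\''])
            omega
          set k := f.toNat with hkdef
          have hfk : f = (k : Int) := by omega
          have he : PySem.Chars.findFrom s ['\''] ((i : Int) + 1) = ((i + 1 + k : Nat) : Int) := by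
            rw [hk1, hff, if_neg hfneg]; push_cast; omega
          rw [if_pos (show PySem.Chars.findFrom s ['\''] ((i : Int) + 1) ≠ -1 by rw [he]; omega)]
          have hspec := PySem.Chars.find_spec (s := s.drop (i + 1)) (sub := ['\'']) hf0
          have hpre : ['\''] <+: (s.drop (i + 1)).drop k := hspec.1
          have hmin := hspec.2
          -- decompose rest = take k ++ '\'' :: drop (k+1)
          obtain ⟨v, hv⟩ := hpre
          have hdk1 : List.drop k (s.drop (i + 1)) = '\'' :: v := hv.symm
          have hdk2 : List.drop (k + 1) (s.drop (i + 1)) = v := by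
            have h1 := congrArg (List.drop 1) hdk1
            rw [List.drop_drop] at h1
            simpa [Nat.add_comm] using h1
          have hdk : (s.drop (i + 1)).drop k = '\'' :: (s.drop (i + 1)).drop (k + 1) := by
            rw [hdk1, hdk2]
          have hrestdec : s.drop (i + 1) = (s.drop (i + 1)).take k ++ '\'' :: (s.drop (i + 1)).drop (k + 1) := by
            conv_lhs => rw [← List.take_append_drop k (s.drop (i + 1))]
            rw [hdk]
          have hnotmem : '\'' ∉ (s.drop (i + 1)).take k := by
            intro hmem
            obtain ⟨j, hj, hjv⟩ := List.mem_iff_getElem.mp hmem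
            have hjb : j < k ∧ j < (s.drop (i + 1)).length := by
              rw [List.length_take] at hj; omega
            refine hmin j (by omega) ⟨(s.drop (i + 1)).drop (j + 1), ?_⟩
            rw [List.drop_eq_getElem_cons hjb.2]
            have hg : (s.drop (i + 1))[j] = '\'' := by
              rw [← hjv]; simp [List.getElem_take]
            simp [hg]
          -- the slice is exactly take k of the rest
          have hslice : PySem.List.slice s (some ((i : Int) + 1)) (some ((i + 1 + k : Nat) : Int)) =
              (s.drop (i + 1)).take k := by
            rw [hk1, PySem.List.slice_natCast]
            congr 1; omega
          have htn : ((i + 1 + k : Nat) : Int).toNat + 1 = i + 1 + (k + 1) := by omega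
          have hdrop2 : s.drop (i + 1 + (k + 1)) = (s.drop (i + 1)).drop (k + 1) := by
            rw [List.drop_drop]
          rw [he, hslice, htn, ih (i + 1 + (k + 1)) _ (by omega), hdrop2, hdropi, hc]
          -- compute the split of the suffix
          obtain ⟨p, r, hpr⟩ : ∃ p r, nslSplitQ (s.drop (i + 1 + (k + 1))) = p :: r := by
            cases hsq : nslSplitQ (s.drop (i + 1 + (k + 1))) with
            | nil => exact absurd hsq (nslSplitQ_ne_nil _)
            | cons p r => exact ⟨p, r, rfl⟩
          conv_rhs => rw [hrestdec]
          simp [nslSplitQ, nslSplitQ_append _ _ hnotmem, nslJoin, nslPairsB, hpr]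
      · rw [if_neg hc, ih (i + 1) (acc ++ [s[i]]) (by omega), hdropi]
        simp only [nslSplitQ, if_neg hc]
        obtain ⟨p, r, hpr⟩ : ∃ p r, nslSplitQ (s.drop (i + 1)) = p :: r := by
          cases hsq : nslSplitQ (s.drop (i + 1)) with
          | nil => exact absurd hsq (nslSplitQ_ne_nil _)
          | cons p r => exact ⟨p, r, rfl⟩
        simp [hpr, nslJoin]
    · rw [dif_neg h]
      have hd : s.drop i = [] := List.drop_eq_nil_of_le (by omega)
      simp [hd, nslSplitQ, nslJoin, nslPairsB]

-- ===== VERDICT (by name: the statement is the Claim_ definition above) =====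
theorem normalize_string_literals_py_spec : Claim_equal_normalize_string_literals_py := by
  intro source _
  unfold Spec_normalize_string_literals_py normalize_string_literals_py normalize_string_literals_py_alt
  rw [nslLoopA_eq source.toList source.toList.length 0 [] (by omega)]
  rw [nslSplitOn_eq]
  obtain ⟨p, r, hpr⟩ : ∃ p r, nslSplitQ source.toList = p :: r := by
    cases hsq : nslSplitQ source.toList with
    | nil => exact absurd hsq (nslSplitQ_ne_nil _)
    | cons p r => exact ⟨p, r, rfl⟩
  simp [hpr, nslJoin]
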